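-- pv_equiv track=rewrite | github.com/devhaeun/Baekjoon_new | 프로그래머스/5/49190. 방의 개수/방의 개수.py | solution
-- ===== SOURCE A (Python) =====
-- def solution(arrows):
--     dx=[0,1,1,1,0,-1,-1,-1]
--     dy=[1,1,0,-1,-1,-1,0,1]
--
--     x,y=0,0
--     visited_node = set()
--     visited_node.add((x,y))
--     route = set()
--     cycle = 0
--
--     for arrow in arrows:
--         for _ in range(2):
--             nx = x+dx[arrow]
--             ny = y+dy[arrow]
--             if (nx,ny) in visited_node and (x,y,nx,ny) not in route:
--                 cycle+=1
--             visited_node.add((nx, ny))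
--             route.add((x,y,nx,ny))
--             route.add((nx,ny,x,y))
--             x,y = nx,ny
--     return cycle
-- ===== SOURCE B (Python) =====
-- def solution(arrows):
--     dx = [0, 1, 1, 1, 0, -1, -1, -1]
--     dy = [1, 1, 0, -1, -1, -1, 0, 1]
--     x, y = 0, 0
--     nodes = {(0, 0)}
--     edges = set()
--     for a in arrows:
--         for _ in range(2):
--             nx, ny = x + dx[a], y + dy[a]
--             nodes.add((nx, ny))
--             edges.add(((x, y), (nx, ny)) if (x, y) <= (nx, ny) else ((nx, ny), (x, y)))
--             x, y = nx, ny
--     # Euler's formula for a connected planar walk: cycles = E - V + 1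
--     return len(edges) - len(nodes) + 1
-- ===== Notes on version B (the rewrite author's own statement) =====
-- stated objective: alternative
-- what changed: Instead of incrementally counting room-closing steps with a visited-node test plus a directed-route test, B collects the distinct nodes and distinct undirected edges of the walk and returns len(edges) - len(nodes) + 1 (Euler's formula for the connected walk graph).
import Mathlib
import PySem

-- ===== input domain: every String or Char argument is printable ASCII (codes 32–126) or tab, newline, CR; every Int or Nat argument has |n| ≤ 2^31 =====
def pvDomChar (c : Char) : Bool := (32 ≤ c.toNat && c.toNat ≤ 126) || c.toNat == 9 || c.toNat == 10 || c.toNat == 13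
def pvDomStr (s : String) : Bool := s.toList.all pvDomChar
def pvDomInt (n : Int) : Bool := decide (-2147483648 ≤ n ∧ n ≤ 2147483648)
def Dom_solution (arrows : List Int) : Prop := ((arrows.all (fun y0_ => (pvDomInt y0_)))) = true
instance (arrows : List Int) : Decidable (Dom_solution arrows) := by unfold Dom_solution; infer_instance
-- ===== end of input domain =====

-- B replaces A's incremental room-closing counter by Euler's formula E - V + 1 on the
-- distinct nodes and distinct undirected edges of the walk (objective: alternative).

-- ===== PORT A =====
-- state: (x, y, visited_node, route, cycle)
def pvStateA := Int × Int × PySem.Set (Int × Int) × PySem.Set (Int × Int × Int × Int) × Int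

-- one iteration of A's inner `for _ in range(2)` body
def pvStepA (arrow : Int) (s : pvStateA) : pvStateA :=
  let (x, y, vis, route, cyc) := s
  let nx := x + PySem.List.pyGetD ([0, 1, 1, 1, 0, -1, -1, -1] : List Int) arrow 0
  let ny := y + PySem.List.pyGetD ([1, 1, 0, -1, -1, -1, 0, 1] : List Int) arrow 0
  let cyc := if PySem.Set.contains vis (nx, ny) && !(PySem.Set.contains route (x, y, nx, ny))
             then cyc + 1 else cyc
  let vis := PySem.Set.add vis (nx, ny)
  let route := PySem.Set.add (PySem.Set.add route (x, y, nx, ny)) (nx, ny, x, y)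
  (nx, ny, vis, route, cyc)

def solution (arrows : List Int) : Int :=
  (arrows.foldl (fun s arrow => pvStepA arrow (pvStepA arrow s))
    (0, 0, PySem.Set.add PySem.Set.empty ((0 : Int), (0 : Int)), PySem.Set.empty, 0)).2.2.2.2

-- ===== PORT B =====
-- state: (x, y, nodes, edges)
def pvStateB := Int × Int × PySem.Set (Int × Int) × PySem.Set ((Int × Int) × (Int × Int))

-- the undirected edge {u, v} stored as a lexicographically sorted pair, as in Source B
def pvNormEdge (u v : Int × Int) : (Int × Int) × (Int × Int) :=
  if u.1 < v.1 ∨ (u.1 = v.1 ∧ u.2 ≤ v.2) then (u, v) else (v, u)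

def pvStepB (a : Int) (s : pvStateB) : pvStateB :=
  let (x, y, nodes, edges) := s
  let nx := x + PySem.List.pyGetD ([0, 1, 1, 1, 0, -1, -1, -1] : List Int) a 0
  let ny := y + PySem.List.pyGetD ([1, 1, 0, -1, -1, -1, 0, 1] : List Int) a 0
  let nodes := PySem.Set.add nodes (nx, ny)
  let edges := PySem.Set.add edges (pvNormEdge (x, y) (nx, ny))
  (nx, ny, nodes, edges)

def solution_alt (arrows : List Int) : Int :=
  let s := arrows.foldl (fun s a => pvStepB a (pvStepB a s))
    (0, 0, PySem.Set.add PySem.Set.empty ((0 : Int), (0 : Int)), PySem.Set.empty)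
  PySem.Set.len s.2.2.2 - PySem.Set.len s.2.2.1 + 1

-- ===== PRECONDITION & SPEC =====
-- Pre_ excludes exactly the arrows outside [-8, 8): there `dx[arrow]` raises IndexError in A
-- (and in B, which indexes the same lists).
def Pre_solution (arrows : List Int) : Prop := ∀ a ∈ arrows, -8 ≤ a ∧ a < 8
instance (arrows : List Int) : Decidable (Pre_solution arrows) := by unfold Pre_solution; infer_instance

def pvWitness_solution : List Int := [6, 6, 6, 4, 4, 4, 2, 2, 2, 0, 0, 0, 1, 6, 5, 5, 3, 2, 0]

def Spec_solution (arrows : List Int) (out : Int) : Prop := out = solution_alt arrows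
instance (arrows : List Int) (out : Int) : Decidable (Spec_solution arrows out) := by unfold Spec_solution; infer_instance

-- ===== CLAIM (what is proved, stated in full; the proofs are below) =====
def Claim_equal_solution : Prop := ∀ (arrows : List Int), Dom_solution arrows → Pre_solution arrows → Spec_solution arrows (solution arrows)

-- ===== LEMMAS AND PROOFS =====

-- the invariant tying A's state to B's state
def pvInv (sa : pvStateA) (sb : pvStateB) : Prop :=
  sa.1 = sb.1 ∧ sa.2.1 = sb.2.1 ∧ sa.2.2.1 = sb.2.2.1 ∧
  (sb.1, sb.2.1) ∈ sb.2.2.1 ∧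
  (∀ a b c d : Int, (a, b, c, d) ∈ sa.2.2.2.1 ↔ pvNormEdge (a, b) (c, d) ∈ sb.2.2.2) ∧
  (∀ a b c d : Int, (a, b, c, d) ∈ sa.2.2.2.1 → (a, b) ∈ sb.2.2.1 ∧ (c, d) ∈ sb.2.2.1) ∧
  sa.2.2.2.2 = (sb.2.2.2.length : Int) - (sb.2.2.1.length : Int) + 1

theorem pvNormEdge_comm (u v : Int × Int) : pvNormEdge u v = pvNormEdge v u := by
  unfold pvNormEdge
  rcases u with ⟨u1, u2⟩; rcases v with ⟨v1, v2⟩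
  split_ifs with h1 h2 h2 <;> simp_all [Prod.ext_iff] <;> omega

theorem pvNormEdge_inj {u v p q : Int × Int} (h : pvNormEdge u v = pvNormEdge p q) :
    (u = p ∧ v = q) ∨ (u = q ∧ v = p) := by
  unfold pvNormEdge at h
  split_ifs at h <;> simp_all [Prod.ext_iff]

theorem pvSet_length_add {α : Type} [BEq α] [LawfulBEq α] (s : PySem.Set α) (x : α) :
    (PySem.Set.add s x).length = if x ∈ s then s.length else s.length + 1 := by
  by_cases h : x ∈ s
  · rw [PySem.Set.add_of_mem h]; simp [h]
  · rw [PySem.Set.add_of_not_mem h]; simp [h]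

theorem pvStep_inv (a : Int) (sa : pvStateA) (sb : pvStateB) (h : pvInv sa sb) :
    pvInv (pvStepA a sa) (pvStepB a sb) := by
  obtain ⟨x, y, vis, route, cyc⟩ := sa
  obtain ⟨x', y', nodes, edges⟩ := sb
  obtain ⟨hx, hy, hv, hcur, hiff, hend, hcyc⟩ := h
  simp only at hx hy hv hcur hiff hend hcyc
  subst hx hy hv
  simp only [pvStepA, pvStepB, pvInv]
  set nx := x + PySem.List.pyGetD ([0, 1, 1, 1, 0, -1, -1, -1] : List Int) a 0 with hnx
  set ny := y + PySem.List.pyGetD ([1, 1, 0, -1, -1, -1, 0, 1] : List Int) a 0 with hny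
  set ne := pvNormEdge (x, y) (nx, ny) with hne
  refine ⟨trivial, trivial, trivial, ?_, ?_, ?_, ?_⟩
  · simp [PySem.Set.mem_add]
  · intro a b c d
    simp only [PySem.Set.mem_add, hiff]
    constructor
    · rintro ((h | h) | h)
      · exact Or.inl h
      · rw [Prod.ext_iff, Prod.ext_iff, Prod.ext_iff] at h
        obtain ⟨h1, h2, h3, h4⟩ := h; simp only at h1 h2 h3 h4; subst h1 h2 h3 h4
        exact Or.inr rfl
      · rw [Prod.ext_iff, Prod.ext_iff, Prod.ext_iff] at h
        obtain ⟨h1, h2, h3, h4⟩ := h; simp only at h1 h2 h3 h4; subst h1 h2 h3 h4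
        exact Or.inr (pvNormEdge_comm _ _)
    · rintro (h | h)
      · exact Or.inl (Or.inl h)
      · rcases pvNormEdge_inj h with ⟨h1, h2⟩ | ⟨h1, h2⟩ <;>
          rw [Prod.ext_iff] at h1 h2 <;> obtain ⟨h1a, h1b⟩ := h1 <;> obtain ⟨h2a, h2b⟩ := h2 <;>
          simp only at h1a h1b h2a h2b <;> subst h1a h1b h2a h2b
        · exact Or.inl (Or.inr rfl)
        · exact Or.inr rfl
  · intro a b c d
    simp only [PySem.Set.mem_add]
    rintro ((h | h) | h)
    · exact ⟨Or.inl (hend _ _ _ _ h).1, Or.inl (hend _ _ _ _ h).2⟩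
    · rw [Prod.ext_iff, Prod.ext_iff, Prod.ext_iff] at h
      obtain ⟨h1, h2, h3, h4⟩ := h; simp only at h1 h2 h3 h4; subst h1 h2 h3 h4
      exact ⟨Or.inl hcur, Or.inr rfl⟩
    · rw [Prod.ext_iff, Prod.ext_iff, Prod.ext_iff] at h
      obtain ⟨h1, h2, h3, h4⟩ := h; simp only at h1 h2 h3 h4; subst h1 h2 h3 h4
      exact ⟨Or.inr rfl, Or.inl hcur⟩
  · rw [pvSet_length_add edges ne, pvSet_length_add vis (nx, ny)]
    have hroute : PySem.Set.contains route (x, y, nx, ny) = decide (ne ∈ edges) := by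
      rw [PySem.Set.contains, Bool.eq_iff_iff, List.contains_iff_mem, hiff x y nx ny, ← hne]
      simp
    have hvis : PySem.Set.contains vis (nx, ny) = decide ((nx, ny) ∈ vis) := by
      rw [PySem.Set.contains, Bool.eq_iff_iff, List.contains_iff_mem]
      simp
    rw [hroute, hvis]
    by_cases he : ne ∈ edges
    · have hn : (nx, ny) ∈ vis := ((hend x y nx ny ((hiff x y nx ny).2 he)).2)
      simp [he, hn, hcyc]
    · by_cases hn : (nx, ny) ∈ vis
      · simp [he, hn, hcyc]; omega
      · simp [he, hn, hcyc]

theorem pvFoldl_inv (arrows : List Int) (sa : pvStateA) (sb : pvStateB) (h : pvInv sa sb) :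
    pvInv (arrows.foldl (fun s arrow => pvStepA arrow (pvStepA arrow s)) sa)
          (arrows.foldl (fun s a => pvStepB a (pvStepB a s)) sb) := by
  induction arrows generalizing sa sb with
  | nil => exact h
  | cons a rest ih => exact ih _ _ (pvStep_inv a _ _ (pvStep_inv a _ _ h))

-- ===== VERDICT (by name: the statement is the Claim_ definition above) =====
theorem solution_spec : Claim_equal_solution := by
  intro arrows _ _
  unfold Spec_solution solution solution_alt
  have h0 : pvInv (0, 0, PySem.Set.add PySem.Set.empty ((0 : Int), (0 : Int)), PySem.Set.empty, 0)
      (0, 0, PySem.Set.add PySem.Set.empty ((0 : Int), (0 : Int)), PySem.Set.empty) := by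
    refine ⟨rfl, rfl, rfl, by decide, ?_, ?_, by decide⟩ <;> intro a b c d <;> simp [PySem.Set.empty]
  have := pvFoldl_inv arrows _ _ h0
  obtain ⟨-, -, -, -, -, -, hcyc⟩ := this
  simp only [PySem.Set.len]
  omega
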